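-- pv_equiv track=rewrite | github.com/pohaoc2/he-feature-visualizer | server_minerva.py | dzi_level_info
-- ===== SOURCE A (Python) =====
-- import math
--
-- TILE_SIZE = 254
--
-- def dzi_level_info(img_w: int, img_h: int, tile_size: int = TILE_SIZE) -> tuple[dict[int, dict], int]:
--     """Return Deep Zoom level metadata and max level index."""
--     max_dim = max(img_w, img_h)
--     max_level = math.ceil(math.log2(max_dim)) if max_dim > 0 else 0
--     levels: dict[int, dict] = {}
--     for level in range(max_level + 1):
--         scale = 2 ** (max_level - level)
--         width = max(1, math.ceil(img_w / scale))
--         height = max(1, math.ceil(img_h / scale))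
--         levels[level] = {
--             "w": width,
--             "h": height,
--             "cols": math.ceil(width / tile_size),
--             "rows": math.ceil(height / tile_size),
--         }
--     return levels, max_level
-- ===== SOURCE B (Python) =====
-- TILE_SIZE = 254
--
-- def dzi_level_info(img_w: int, img_h: int, tile_size: int = TILE_SIZE) -> tuple[dict[int, dict], int]:
--     """Deep Zoom level metadata via a top-down halving recurrence (exact integer ceiling division)."""
--     max_dim = max(img_w, img_h)
--     max_level = (max_dim - 1).bit_length() if max_dim > 0 else 0
--     cdiv = lambda a, b: -(-a // b)  # == math.ceil(a / b), exactly, for any b != 0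
--     w = max(1, img_w)
--     h = max(1, img_h)
--     rev = []
--     for level in range(max_level, -1, -1):
--         rev.append((level, {"w": w, "h": h, "cols": cdiv(w, tile_size), "rows": cdiv(h, tile_size)}))
--         w = max(1, cdiv(w, 2))
--         h = max(1, cdiv(h, 2))
--     return dict(reversed(rev)), max_level
-- ===== Notes on version B (the rewrite author's own statement) =====
-- stated objective: alternative
-- what changed: B computes max_level with (max_dim-1).bit_length() and builds the levels top-down by threading the running width/height through a max(1, ceil(w/2)) halving recurrence (then reverses), instead of A's per-level scale = 2**(max_level-level) recomputation with float division; both use exact integer ceiling division.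
-- outside the precondition, e.g. on dzi_level_info(100, 80, 0): A raises ZeroDivisionError, B raises ZeroDivisionError
import Mathlib
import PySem

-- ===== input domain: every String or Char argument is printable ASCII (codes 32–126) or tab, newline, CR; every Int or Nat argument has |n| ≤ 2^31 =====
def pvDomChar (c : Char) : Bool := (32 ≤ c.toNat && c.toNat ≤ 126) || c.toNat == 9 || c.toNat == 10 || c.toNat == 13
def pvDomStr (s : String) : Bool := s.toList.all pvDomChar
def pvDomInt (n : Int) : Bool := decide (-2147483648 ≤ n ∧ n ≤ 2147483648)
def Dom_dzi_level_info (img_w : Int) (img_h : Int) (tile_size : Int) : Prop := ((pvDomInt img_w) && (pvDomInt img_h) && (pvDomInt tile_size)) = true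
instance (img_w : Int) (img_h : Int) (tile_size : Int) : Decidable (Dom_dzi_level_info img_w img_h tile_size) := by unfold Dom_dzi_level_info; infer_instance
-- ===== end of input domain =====

-- B replaces A's per-level scale = 2**(max_level-level) recomputation by a top-down halving
-- recurrence on the running dimensions (objective: alternative decomposition, same cost).

-- ===== PORT A =====
-- math.ceil(a / b): exact integer ceiling division (A's float division + ceil is exact on the
-- stated domain |ints| ≤ 2^31; b ≠ 0 is Pre_)
def pvCeilA (a b : Int) : Int := -(PySem.Int.floordiv (-a) b)

def dzi_level_info (img_w : Int) (img_h : Int) (tile_size : Int) : (List (Int × List (String × Int))) × Int :=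
  let max_dim := max img_w img_h
  -- math.ceil(math.log2(max_dim)): exact on the domain; Nat.clog 2 is integer ceiling log base 2
  let max_level : Int := if max_dim > 0 then ((Nat.clog 2 max_dim.toNat : Nat) : Int) else 0
  let levels : PySem.Dict Int (List (String × Int)) :=
    (PySem.List.pyRange 0 (max_level + 1) 1).foldl (fun d level =>
      let scale : Int := 2 ^ (max_level - level).toNat   -- exponent nonnegative on the range
      let width := max 1 (pvCeilA img_w scale)
      let height := max 1 (pvCeilA img_h scale)
      d.insert level [("w", width), ("h", height),
                      ("cols", pvCeilA width tile_size), ("rows", pvCeilA height tile_size)])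
      PySem.Dict.empty
  (levels.items, max_level)

-- ===== PORT B =====
-- cdiv = lambda a, b: -(-a // b)
def pvCdiv (a b : Int) : Int := -(PySem.Int.floordiv (-a) b)

-- one appended dict {"w": w, "h": h, "cols": …, "rows": …}
def pvEntryB (w h tile : Int) : List (String × Int) :=
  [("w", w), ("h", h), ("cols", pvCdiv w tile), ("rows", pvCdiv h tile)]

-- the for-loop over range(max_level, -1, -1): appends (level, entry) and halves w, h
def pvRevB (tile : Int) : Nat → Int → Int → List (Int × List (String × Int))
  | 0, w, h => [(0, pvEntryB w h tile)]
  | n+1, w, h => (((n : Int) + 1), pvEntryB w h tile) :: pvRevB tile n (max 1 (pvCdiv w 2)) (max 1 (pvCdiv h 2))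

def dzi_level_info_alt (img_w : Int) (img_h : Int) (tile_size : Int) : (List (Int × List (String × Int))) × Int :=
  let max_dim := max img_w img_h
  -- (max_dim - 1).bit_length()
  let max_level : Int := if max_dim > 0 then ((PySem.Int.bitLength (max_dim - 1) : Nat) : Int) else 0
  let rev := pvRevB tile_size max_level.toNat (max 1 img_w) (max 1 img_h)
  (rev.reverse, max_level)

-- ===== PRECONDITION & SPEC =====
-- Pre_ excludes exactly tile_size = 0, where A raises ZeroDivisionError (B does too)
def Pre_dzi_level_info (img_w : Int) (img_h : Int) (tile_size : Int) : Prop := tile_size ≠ 0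
instance (img_w : Int) (img_h : Int) (tile_size : Int) : Decidable (Pre_dzi_level_info img_w img_h tile_size) := by unfold Pre_dzi_level_info; infer_instance
def pvWitness_dzi_level_info : Int × Int × Int := (100, 80, 254)

def Spec_dzi_level_info (img_w : Int) (img_h : Int) (tile_size : Int) (out : (List (Int × List (String × Int))) × Int) : Prop := out = dzi_level_info_alt img_w img_h tile_size
instance (img_w : Int) (img_h : Int) (tile_size : Int) (out : (List (Int × List (String × Int))) × Int) : Decidable (Spec_dzi_level_info img_w img_h tile_size out) := by unfold Spec_dzi_level_info; infer_instance

-- ===== CLAIM (what is proved, stated in full; the proofs are below) =====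
def Claim_equal_dzi_level_info : Prop := ∀ (img_w : Int) (img_h : Int) (tile_size : Int), Dom_dzi_level_info img_w img_h tile_size → Pre_dzi_level_info img_w img_h tile_size → Spec_dzi_level_info img_w img_h tile_size (dzi_level_info img_w img_h tile_size)

-- ===== LEMMAS AND PROOFS =====

-- the two ceiling-division helpers are the same function
theorem pvCeilA_eq_pvCdiv : pvCeilA = pvCdiv := rfl

-- clamped running dimension: max(1, ceil(a / 2^k))
def pvG (a : Int) (k : Nat) : Int := max 1 (pvCdiv a (2 ^ k))

theorem pvCdiv_one (a : Int) : pvCdiv a 1 = a := by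
  simp [pvCdiv, PySem.Int.floordiv, Int.fdiv_one]

theorem pvG_zero (a : Int) : pvG a 0 = max 1 a := by
  simp [pvG, pvCdiv_one]

-- floor-division composition for positive divisors
theorem pv_floordiv_floordiv (x m : Int) (hm : 0 < m) :
    PySem.Int.floordiv (PySem.Int.floordiv x m) 2 = PySem.Int.floordiv x (m * 2) := by
  have h2 : (0 : Int) < 2 := by omega
  have hm2 : (0 : Int) < m * 2 := by positivity
  symm
  rw [PySem.Int.floordiv_eq_iff_of_pos hm2]
  set q := PySem.Int.floordiv (PySem.Int.floordiv x m) 2 with hq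
  have h1 := (PySem.Int.floordiv_eq_iff_of_pos h2).mp hq.symm
  constructor
  · have := (PySem.Int.le_floordiv_iff_mul_le (a := x) (b := m) hm).mp (by omega : q * 2 ≤ PySem.Int.floordiv x m)
    nlinarith
  · have := (PySem.Int.floordiv_lt_iff_lt_mul (a := x) (b := m) hm).mp (by omega : PySem.Int.floordiv x m < (q + 1) * 2)
    nlinarith

-- the halving step advances pvG by one
theorem pvG_step (a : Int) (k : Nat) : max 1 (pvCdiv (pvG a k) 2) = pvG a (k + 1) := by
  have hp : (0 : Int) < 2 ^ k := by positivity
  by_cases ha : a ≤ 0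
  · -- a ≤ 0 : everything is clamped to 1
    have h1 : pvCdiv a (2 ^ k) ≤ 0 := by
      have : (0 : Int) ≤ PySem.Int.floordiv (-a) (2 ^ k) :=
        (PySem.Int.le_floordiv_iff_mul_le hp).mpr (by omega)
      simp only [pvCdiv]; omega
    have h2 : pvCdiv a (2 ^ (k + 1)) ≤ 0 := by
      have : (0 : Int) ≤ PySem.Int.floordiv (-a) (2 ^ (k + 1)) :=
        (PySem.Int.le_floordiv_iff_mul_le (by positivity)).mpr (by omega)
      simp only [pvCdiv]; omega
    have hg : pvG a k = 1 := by simp only [pvG]; omega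
    have h12 : pvCdiv 1 2 = 1 := by decide
    rw [hg, h12]
    simp only [pvG]; omega
  · -- 0 < a : the clamps are inactive and ceil-div composes
    have ha' : 0 < a := by omega
    have hcd : ∀ (p : Int), 0 < p → 1 ≤ pvCdiv a p := by
      intro p hpp
      have h0 : PySem.Int.floordiv (-a) p ≤ -1 := by
        by_contra h
        have := (PySem.Int.le_floordiv_iff_mul_le hpp).mp
          (by omega : (0 : Int) ≤ PySem.Int.floordiv (-a) p)
        nlinarith
      simp only [pvCdiv]; omega
    have hg : pvG a k = pvCdiv a (2 ^ k) := by
      have := hcd _ hp; simp only [pvG]; omega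
    have hcomp : pvCdiv (pvCdiv a (2 ^ k)) 2 = pvCdiv a (2 ^ (k + 1)) := by
      simp only [pvCdiv, neg_neg]
      rw [pv_floordiv_floordiv _ _ hp, pow_succ]
    rw [hg, hcomp]; simp only [pvG]

-- the reversed B loop, characterised level by level
theorem pvRevB_reverse (tile a b : Int) : ∀ (n k : Nat),
    (pvRevB tile n (pvG a k) (pvG b k)).reverse =
      (List.range (n + 1)).map (fun (i : Nat) => ((i : Int), pvEntryB (pvG a (k + n - i)) (pvG b (k + n - i)) tile)) := by
  intro n
  induction n with
  | zero => intro k; simp [pvRevB, List.range_succ]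
  | succ n ih =>
    intro k
    have : pvRevB tile (n + 1) (pvG a k) (pvG b k)
        = (((n : Int) + 1), pvEntryB (pvG a k) (pvG b k) tile) :: pvRevB tile n (pvG a (k + 1)) (pvG b (k + 1)) := by
      rw [pvRevB, pvG_step, pvG_step]
    rw [this]
    simp only [List.reverse_cons, ih (k + 1)]
    rw [List.range_succ (n := n + 1), List.map_append]
    congr 1
    · apply List.map_congr_left
      intro i hi
      simp only [List.mem_range] at hi
      have : k + 1 + n - i = k + (n + 1) - i := by omega
      rw [this]
    · simp only [List.map_cons, List.map_nil]
      have : k + (n + 1) - (n + 1) = k := by omega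
      rw [this]
      push_cast
      ring_nf

-- A's max_level equals B's: ceiling log2 n = bit_length(n - 1) for n ≥ 1
theorem pv_clog_eq_bitLength (n : Int) (hn : 0 < n) :
    Nat.clog 2 n.toNat = PySem.Int.bitLength (n - 1) := by
  rcases (by omega : n = 1 ∨ 1 < n) with h1 | h1
  · subst h1; decide
  · -- n ≥ 2
    set L := PySem.Int.bitLength (n - 1) with hL
    have hup : (n - 1).natAbs < 2 ^ L := PySem.Int.lt_two_pow_bitLength (n - 1)
    have hlo : 2 ^ (L - 1) ≤ (n - 1).natAbs := PySem.Int.two_pow_bitLength_le (n - 1) (by omega)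
    have habs : (n - 1).natAbs = n.toNat - 1 := by omega
    apply le_antisymm
    · rw [Nat.clog_le_iff_le_pow (by omega)]
      omega
    · by_contra h
      have hlt : Nat.clog 2 n.toNat < L := by omega
      have hL1 : 1 ≤ L := by
        by_contra hL0
        have : L = 0 := by omega
        rw [this] at hup; simp at hup; omega
      have : Nat.clog 2 n.toNat ≤ L - 1 := by omega
      rw [Nat.clog_le_iff_le_pow (by omega)] at this
      have hlo' : 2 ^ (L - 1) ≤ n.toNat - 1 := by omega
      omega

-- A's level list, computed explicitly
theorem pvA_items (img_w img_h tile : Int) (Ln : Nat) :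
    ((PySem.List.pyRange 0 ((Ln : Int) + 1) 1).foldl (fun d level =>
      let scale : Int := 2 ^ (((Ln : Int)) - level).toNat
      let width := max 1 (pvCeilA img_w scale)
      let height := max 1 (pvCeilA img_h scale)
      d.insert level [("w", width), ("h", height),
                      ("cols", pvCeilA width tile), ("rows", pvCeilA height tile)])
      (PySem.Dict.empty : PySem.Dict Int (List (String × Int)))).items
    = (List.range (Ln + 1)).map (fun (i : Nat) =>
        ((i : Int), pvEntryB (pvG img_w (Ln - i)) (pvG img_h (Ln - i)) tile)) := by
  rw [PySem.Dict.items_foldl_insert_fresh _ (fun level => level) _ _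
      (fun a _ => PySem.Dict.contains_empty a) (by simpa using PySem.List.nodup_pyRange_one 0 ((Ln : Int) + 1))]
  rw [PySem.List.pyRange_one]
  simp only [List.map_map]
  rw [show ((Ln : Int) + 1 - 0).toNat = Ln + 1 by omega]
  simp only [show (PySem.Dict.empty : PySem.Dict Int (List (String × Int))).items = [] from rfl, List.nil_append]
  apply List.map_congr_left
  intro i hi
  simp only [List.mem_range] at hi
  have hz : (0 : Int) + (i : Int) = (i : Int) := by omega
  simp only [Function.comp, hz, pvEntryB, pvG, pvCeilA_eq_pvCdiv]
  rw [show ((Ln : Int) - (i : Int)).toNat = Ln - i from by omega]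

-- ===== VERDICT (by name: the statement is the Claim_ definition above) =====
theorem dzi_level_info_spec : Claim_equal_dzi_level_info := by
  intro img_w img_h tile_size _ _
  unfold Spec_dzi_level_info dzi_level_info dzi_level_info_alt
  simp only []
  by_cases hmd : max img_w img_h > 0
  · simp only [if_pos hmd]
    have hml : ((Nat.clog 2 (max img_w img_h).toNat : Nat) : Int)
        = ((PySem.Int.bitLength (max img_w img_h - 1) : Nat) : Int) := by
      exact congrArg (fun m : Nat => (m : Int)) (pv_clog_eq_bitLength _ hmd)
    rw [hml]
    set Ln : Nat := PySem.Int.bitLength (max img_w img_h - 1) with hLn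
    rw [pvA_items img_w img_h tile_size Ln]
    have hB : (pvRevB tile_size ((Ln : Int)).toNat (max 1 img_w) (max 1 img_h)).reverse
        = (List.range (Ln + 1)).map (fun (i : Nat) =>
            ((i : Int), pvEntryB (pvG img_w (Ln - i)) (pvG img_h (Ln - i)) tile_size)) := by
      rw [Int.toNat_natCast, ← pvG_zero img_w, ← pvG_zero img_h, pvRevB_reverse]
      simp
    rw [hB]
  · simp only [if_neg hmd]
    have h0 := pvA_items img_w img_h tile_size 0
    simp only [Nat.cast_zero] at h0
    rw [h0]
    simp [pvRevB, pvG_zero, List.range_succ]
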